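-- pv_equiv track=rewrite | github.com/w906022793/webqq | qqbot.py | qHash
-- ===== SOURCE A (Python) =====
-- def qHash(x, K):
--     N = [0] * 4
--     for T in range(len(K)):
--         N[T%4] ^= ord(K[T])
--
--     U = "ECOK"
--     V = [0] * 4
--     V[0] = ((x >> 24) & 255) ^ ord(U[0])
--     V[1] = ((x >> 16) & 255) ^ ord(U[1])
--     V[2] = ((x >>  8) & 255) ^ ord(U[2])
--     V[3] = ((x >>  0) & 255) ^ ord(U[3])
--
--     U1 = [0] * 8
--
--     for T in range(8):
--         U1[T] = N[T >> 1] if T % 2 == 0 else V[T >> 1]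
--
--     N1 = ["0", "1", "2", "3", "4", "5", "6", "7", "8", "9", "A", "B", "C", "D", "E", "F"]
--     V1 = ""
--     for aU1 in U1:
--         V1 += N1[((aU1 >> 4) & 15)]
--         V1 += N1[((aU1 >> 0) & 15)]
--
--     return V1
-- ===== SOURCE B (Python) =====
-- def qHash(x, K):
--     # Fold K into four running XOR accumulators, then pack the eight output
--     # bytes (N interleaved with the x-bytes XOR "ECOK") into one 64-bit
--     # integer and format it as 16 uppercase hex digits in a single step.
--     N = [0, 0, 0, 0]
--     for i, c in enumerate(K):
--         N[i % 4] ^= ord(c)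
--     w = 0
--     for n, sh, u in zip(N, (24, 16, 8, 0), "ECOK"):
--         w = w * 65536 + (n % 256) * 256 + (((x >> sh) % 256) ^ ord(u))
--     return "%016X" % w
-- ===== Notes on version B (the rewrite author's own statement) =====
-- stated objective: simpler
-- what changed: Drops the U1 interleave buffer and the hand-rolled nibble table: the eight output bytes are packed into one 64-bit integer and formatted with a single %016X, so two of A's three loops disappear.
import Mathlib
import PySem

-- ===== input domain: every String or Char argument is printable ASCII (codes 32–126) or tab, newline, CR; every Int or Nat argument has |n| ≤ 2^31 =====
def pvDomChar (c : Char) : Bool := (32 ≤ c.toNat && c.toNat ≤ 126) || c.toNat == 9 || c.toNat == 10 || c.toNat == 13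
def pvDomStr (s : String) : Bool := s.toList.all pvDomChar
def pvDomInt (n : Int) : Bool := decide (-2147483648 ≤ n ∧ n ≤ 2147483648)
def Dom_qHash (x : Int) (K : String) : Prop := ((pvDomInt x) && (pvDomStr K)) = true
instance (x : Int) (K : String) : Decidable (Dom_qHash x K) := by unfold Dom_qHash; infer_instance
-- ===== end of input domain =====

-- B packs the eight output bytes into one 64-bit integer and formats it with a single
-- "%016X", dropping A's U1 interleave buffer and hand-rolled nibble-table loop (simpler).

-- ===== PORT A =====
-- the N loop: T always indexes K in range, so K[T] is ported as getD (exact)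
def qHashN (l : List Char) : List Nat :=
  (List.range l.length).foldl
    (fun N T => N.set (T % 4) ((N.getD (T % 4) 0) ^^^ (l.getD T ' ').toNat))
    [0, 0, 0, 0]

def hexTableA : List Char :=
  ['0', '1', '2', '3', '4', '5', '6', '7', '8', '9', 'A', 'B', 'C', 'D', 'E', 'F']

-- the V1 accumulation: Python string '+=' is ported as char-list append (exact)
def qHashHex (U1 : List Nat) : List Char :=
  U1.foldl (fun cs a => cs ++ [hexTableA.getD ((a >>> 4) &&& 15) '0',
                               hexTableA.getD ((a >>> 0) &&& 15) '0']) []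

-- Python 'x >> k' is floor division by 2^k and '& 255' is 'mod 256' (exact);
-- the masked byte is in [0,256), so .toNat is exact
def qHash (x : Int) (K : String) : String :=
  let N := qHashN K.toList
  let V : List Nat :=
    [ (PySem.Int.mod (PySem.Int.floordiv x 16777216) 256).toNat ^^^ 'E'.toNat,
      (PySem.Int.mod (PySem.Int.floordiv x 65536) 256).toNat ^^^ 'C'.toNat,
      (PySem.Int.mod (PySem.Int.floordiv x 256) 256).toNat ^^^ 'O'.toNat,
      (PySem.Int.mod (PySem.Int.floordiv x 1) 256).toNat ^^^ 'K'.toNat ]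
  let U1 : List Nat :=
    (List.range 8).map (fun T => if T % 2 == 0 then N.getD (T >>> 1) 0 else V.getD (T >>> 1) 0)
  String.mk (qHashHex U1)

-- ===== PORT B =====
def qHashNAlt (l : List Char) : List Nat :=
  (PySem.List.enumerate l 0).foldl
    (fun N p => N.set ((PySem.Int.mod p.1 4).toNat)
                      ((N.getD ((PySem.Int.mod p.1 4).toNat) 0) ^^^ p.2.toNat))
    [0, 0, 0, 0]

-- port of '"%016X" % w'; exact for w < 16^16 (always the case here: w is 8 packed bytes)
def hex16 (w : Nat) : String :=
  String.mk ((List.range 16).map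
    (fun i => "0123456789ABCDEF".toList.getD (w / 16 ^ (15 - i) % 16) '0'))

-- 'x >> sh' / '% 256' ported as floor division / Int.mod (exact); the byte is in [0,256)
def qHash_alt (x : Int) (K : String) : String :=
  let N := qHashNAlt K.toList
  let w : Nat :=
    (N.zip [((24 : Nat), 'E'), (16, 'C'), (8, 'O'), (0, 'K')]).foldl
      (fun w p => w * 65536 + (p.1 % 256) * 256 +
        ((PySem.Int.mod (PySem.Int.floordiv x (2 ^ p.2.1)) 256).toNat ^^^ p.2.2.toNat))
      0
  hex16 w

-- ===== PRECONDITION & SPEC =====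
def Spec_qHash (x : Int) (K : String) (out : String) : Prop := out = qHash_alt x K
instance (x : Int) (K : String) (out : String) : Decidable (Spec_qHash x K out) := by
  unfold Spec_qHash; infer_instance

-- ===== CLAIM (what is proved, stated in full; the proofs are below) =====
def Claim_equal_qHash : Prop := ∀ (x : Int) (K : String), Dom_qHash x K → Spec_qHash x K (qHash x K)

-- ===== LEMMAS AND PROOFS =====

lemma pv_modcast (T : Nat) : (PySem.Int.mod (T : Int) 4).toNat = T % 4 := by
  rw [PySem.Int.mod_eq_emod_of_pos (by norm_num)]
  omega

lemma pv_NAux : ∀ (l : List Char) (s : Nat) (b : List Nat),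
    (PySem.List.enumerate l (s : Int)).foldl
      (fun N p => N.set ((PySem.Int.mod p.1 4).toNat)
                        ((N.getD ((PySem.Int.mod p.1 4).toNat) 0) ^^^ p.2.toNat)) b
    = (List.range l.length).foldl
      (fun N T => N.set ((s + T) % 4) ((N.getD ((s + T) % 4) 0) ^^^ (l.getD T ' ').toNat)) b := by
  intro l
  induction l with
  | nil => intro s b; simp [PySem.List.enumerate_nil]
  | cons c t ih =>
    intro s b
    rw [PySem.List.enumerate_cons]
    simp only [List.foldl_cons, pv_modcast]
    have h1 : ((s : Int) + 1) = (((s + 1 : Nat)) : Int) := by push_cast; ring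
    rw [h1, ih (s + 1)]
    rw [List.length_cons, List.range_succ_eq_map]
    simp only [List.foldl_cons, List.foldl_map, List.getD_cons_zero, List.getD_cons_succ,
      Nat.add_zero]
    have h2 : ∀ T : Nat, s + 1 + T = s + (T + 1) := by omega
    simp [h2]

lemma pv_N_eq (l : List Char) : qHashNAlt l = qHashN l := by
  unfold qHashNAlt qHashN
  simpa using pv_NAux l 0 [0, 0, 0, 0]

lemma pv_qHashN_len (l : List Char) : (qHashN l).length = 4 := by
  unfold qHashN
  suffices h : ∀ (ts : List Nat) (N : List Nat),
      (ts.foldl (fun N T => N.set (T % 4) ((N.getD (T % 4) 0) ^^^ (l.getD T ' ').toNat)) N).length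
        = N.length by
    simpa using h (List.range l.length) [0, 0, 0, 0]
  intro ts
  induction ts with
  | nil => intro N; rfl
  | cons t ts ih => intro N; rw [List.foldl_cons, ih, List.length_set]

lemma pv_list4 {α : Type} (l : List α) (h : l.length = 4) : ∃ a b c d, l = [a, b, c, d] := by
  rcases l with _ | ⟨a, _ | ⟨b, _ | ⟨c, _ | ⟨d, _ | ⟨e, t⟩⟩⟩⟩⟩ <;> simp_all

lemma pv_byte_xor_lt (y : Int) (c : Nat) (hc : c < 256) :
    (y % 256).toNat ^^^ c < 256 := by
  have h1 : (0 : Int) ≤ y % 256 := Int.emod_nonneg y (by norm_num)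
  have h2 : y % 256 < 256 := Int.emod_lt_of_pos y (by norm_num)
  have h3 : (y % 256).toNat < 2 ^ 8 := by omega
  have h4 : (y % 256).toNat ^^^ c < 2 ^ 8 := Nat.xor_lt_two_pow h3 (by omega)
  omega

-- ===== VERDICT (by name: the statement is the Claim_ definition above) =====
theorem qHash_spec : Claim_equal_qHash := by
  intro x K _
  unfold Spec_qHash qHash qHash_alt
  obtain ⟨n0, n1, n2, n3, hN⟩ := pv_list4 (qHashN K.toList) (pv_qHashN_len K.toList)
  rw [pv_N_eq, hN]
  have hr8 : List.range 8 = [0, 1, 2, 3, 4, 5, 6, 7] := by rfl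
  have hr16 : List.range 16 = [0, 1, 2, 3, 4, 5, 6, 7, 8, 9, 10, 11, 12, 13, 14, 15] := by rfl
  have htab : "0123456789ABCDEF".toList = hexTableA := by rfl
  have hand15 : ∀ a : Nat, a &&& 15 = a % 16 := fun a => Nat.and_two_pow_sub_one_eq_mod a 4
  have hshr4 : ∀ a : Nat, a >>> 4 = a / 16 := fun a => Nat.shiftRight_eq_div_pow a 4
  unfold qHashHex hex16
  simp only [hr8, hr16, htab, List.map_cons, List.map_nil, List.zip_cons_cons, List.zip_nil_right,
    List.foldl_cons, List.foldl_nil, List.getD_cons_zero, List.getD_cons_succ, hand15, hshr4,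
    Nat.shiftRight_zero, show ((0 : Nat) >>> 1) = 0 from rfl, show ((1 : Nat) >>> 1) = 0 from rfl,
    show ((2 : Nat) >>> 1) = 1 from rfl, show ((3 : Nat) >>> 1) = 1 from rfl,
    show ((4 : Nat) >>> 1) = 2 from rfl, show ((5 : Nat) >>> 1) = 2 from rfl,
    show ((6 : Nat) >>> 1) = 3 from rfl, show ((7 : Nat) >>> 1) = 3 from rfl]
  norm_num
  generalize hg0 : (x / 16777216 % 256).toNat ^^^ 'E'.toNat = v0
  generalize hg1 : (x / 65536 % 256).toNat ^^^ 'C'.toNat = v1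
  generalize hg2 : (x / 256 % 256).toNat ^^^ 'O'.toNat = v2
  generalize hg3 : (x % 256).toNat ^^^ 'K'.toNat = v3
  have hv0 : v0 < 256 := hg0 ▸ pv_byte_xor_lt (x / 16777216) 'E'.toNat (by decide)
  have hv1 : v1 < 256 := hg1 ▸ pv_byte_xor_lt (x / 65536) 'C'.toNat (by decide)
  have hv2 : v2 < 256 := hg2 ▸ pv_byte_xor_lt (x / 256) 'O'.toNat (by decide)
  have hv3 : v3 < 256 := hg3 ▸ pv_byte_xor_lt x 'K'.toNat (by decide)
  refine congrArg String.mk ?_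
  simp only [List.cons.injEq, and_true]
  and_intros <;>
    exact congrArg (fun i => List.getD hexTableA i '0') (by omega)
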